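-- pv_equiv track=rewrite | github.com/hazarn01/ED_BOT_V8 | src/pipeline/medical_response_formatter.py | _extract_backup_contacts
-- ===== SOURCE A (Python) =====
-- from typing import Any, Dict, List
--
-- def _extract_backup_contacts(content: str) -> List[str]:
--     """Extract backup contact information."""
--     backups = []
--
--     backup_keywords = ['backup', 'alternative', 'secondary']
--     for keyword in backup_keywords:
--         if keyword.lower() in content.lower():
--             # Find sentences with backup info
--             sentences = content.split('.')
--             for sentence in sentences:
--                 if keyword.lower() in sentence.lower():
--                     backups.append(sentence.strip())
--
--     return backups[:3]
-- ===== SOURCE B (Python) =====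
-- from typing import List
--
-- def _extract_backup_contacts(content: str) -> List[str]:
--     """Extract backup contact information."""
--     backup_hits: List[str] = []
--     alternative_hits: List[str] = []
--     secondary_hits: List[str] = []
--     for sentence in content.split('.'):
--         low = sentence.lower()
--         stripped = sentence.strip()
--         if 'backup' in low:
--             backup_hits.append(stripped)
--         if 'alternative' in low:
--             alternative_hits.append(stripped)
--         if 'secondary' in low:
--             secondary_hits.append(stripped)
--     return (backup_hits + alternative_hits + secondary_hits)[:3]
-- ===== Notes on version B (the rewrite author's own statement) =====
-- stated objective: alternative
-- what changed: B splits the content into sentences once and makes a single pass over them, routing each sentence into one of three per-keyword buckets, then concatenates the buckets in keyword order and truncates to 3; A re-splits the content and re-scans all sentences once per keyword after an extra whole-content scan per keyword.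
import Mathlib
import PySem

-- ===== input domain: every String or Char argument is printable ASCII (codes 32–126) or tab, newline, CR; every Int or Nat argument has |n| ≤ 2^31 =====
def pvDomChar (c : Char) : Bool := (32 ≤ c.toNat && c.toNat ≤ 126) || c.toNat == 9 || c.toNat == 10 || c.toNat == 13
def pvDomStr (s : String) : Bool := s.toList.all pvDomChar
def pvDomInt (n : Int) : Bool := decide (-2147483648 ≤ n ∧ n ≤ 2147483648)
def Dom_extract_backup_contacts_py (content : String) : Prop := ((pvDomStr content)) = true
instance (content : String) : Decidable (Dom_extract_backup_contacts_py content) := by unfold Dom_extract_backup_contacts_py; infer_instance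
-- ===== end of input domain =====

-- B replaces A's per-keyword re-split and re-scan of the content by one split and one pass over
-- the sentences into three keyword buckets, concatenated in keyword order (objective: alternative single-pass decomposition).

-- ===== PORT A =====
-- content.split('.') : sep is the non-empty literal ".", so Python never raises; split? is some here.
def extract_backup_contacts_py (content : String) : List String :=
  let backups : List String := []
  let backup_keywords : List String := ["backup", "alternative", "secondary"]
  let backups := backup_keywords.foldl (fun backups keyword =>
    if PySem.Str.isIn (PySem.Str.lower keyword) (PySem.Str.lower content) then
      let sentences := (PySem.Str.split? content ".").getD []
      sentences.foldl (fun backups sentence =>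
        if PySem.Str.isIn (PySem.Str.lower keyword) (PySem.Str.lower sentence) then
          backups ++ [PySem.Str.strip sentence]
        else backups) backups
    else backups) backups
  PySem.List.slice backups none (some 3)

-- ===== PORT B =====
def extract_backup_contacts_py_alt (content : String) : List String :=
  let buckets : List String × List String × List String :=
    ((PySem.Str.split? content ".").getD []).foldl (fun b sentence =>
      let low := PySem.Str.lower sentence
      let stripped := PySem.Str.strip sentence
      let b1 := if PySem.Str.isIn "backup" low then b.1 ++ [stripped] else b.1
      let b2 := if PySem.Str.isIn "alternative" low then b.2.1 ++ [stripped] else b.2.1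
      let b3 := if PySem.Str.isIn "secondary" low then b.2.2 ++ [stripped] else b.2.2
      (b1, b2, b3)) ([], [], [])
  PySem.List.slice (buckets.1 ++ buckets.2.1 ++ buckets.2.2) none (some 3)

-- ===== PRECONDITION & SPEC =====
def Spec_extract_backup_contacts_py (content : String) (out : List String) : Prop := out = extract_backup_contacts_py_alt content
instance (content : String) (out : List String) : Decidable (Spec_extract_backup_contacts_py content out) := by unfold Spec_extract_backup_contacts_py; infer_instance

-- ===== CLAIM (what is proved, stated in full; the proofs are below) =====
def Claim_equal_extract_backup_contacts_py : Prop := ∀ (content : String), Dom_extract_backup_contacts_py content → Spec_extract_backup_contacts_py content (extract_backup_contacts_py content)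

-- ===== LEMMAS AND PROOFS =====

-- every piece produced by splitOn.go is an infix of the string being split
theorem pv_go_infix (sep : List Char) (cs : List Char) :
    ∀ (fuel : Nat) (l cur : List Char) (acc : List (List Char)),
      (∀ x ∈ acc, x <:+: cs) → (cur.reverse ++ l) <:+: cs →
      ∀ x ∈ PySem.Chars.splitOn.go sep fuel l cur acc, x <:+: cs := by
  intro fuel
  induction fuel with
  | zero =>
    intro l cur acc hacc hcur x hx
    simp [PySem.Chars.splitOn.go] at hx
    rcases hx with h | h
    · exact hacc x h
    · subst h; exact hcur
  | succ fuel ih =>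
    intro l cur acc hacc hcur x hx
    cases l with
    | nil =>
      simp [PySem.Chars.splitOn.go] at hx
      rcases hx with h | h
      · exact hacc x h
      · subst h
        exact ((List.prefix_append cur.reverse []).isInfix).trans hcur
    | cons c rest =>
      rw [PySem.Chars.splitOn.go] at hx
      split at hx
      · refine ih _ _ _ ?_ ?_ x hx
        · intro y hy
          rcases List.mem_cons.mp hy with h | h
          · subst h
            exact ((List.prefix_append cur.reverse (c::rest)).isInfix).trans hcur
          · exact hacc y h
        · simp only [List.reverse_nil, List.nil_append]
          exact (((List.drop_suffix _ _).trans (List.suffix_append cur.reverse (c::rest))).isInfix).trans hcur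
      · refine ih _ _ _ hacc ?_ x hx
        simpa using hcur

theorem pv_mem_splitOn_infix (cs sep : List Char) (x : List Char)
    (h : x ∈ PySem.Chars.splitOn cs sep) : x <:+: cs := by
  rw [PySem.Chars.splitOn] at h
  exact pv_go_infix sep cs _ _ _ _ (by simp) (by simp) x h

-- a sentence of content.split('.') that contains kw (case-insensitively) forces kw into lower(content)
theorem pv_sentence_to_content (content : String) (kw s : String)
    (hs : s ∈ (PySem.Str.split? content ".").getD [])
    (hin : PySem.Str.isIn kw (PySem.Str.lower s) = true) :
    PySem.Str.isIn kw (PySem.Str.lower content) = true := by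
  rw [PySem.Str.isIn_iff_infix] at hin ⊢
  rw [PySem.Str.toList_lower] at hin ⊢
  rw [PySem.Str.split?, PySem.Chars.split?] at hs
  simp at hs
  obtain ⟨x, hx, rfl⟩ := hs
  have hinf : x <:+: content.toList := pv_mem_splitOn_infix _ _ _ hx
  have : (String.ofList x).toList = x := by simp
  rw [this] at hin
  unfold PySem.Chars.lower at hin ⊢
  exact hin.trans (hinf.map _)

-- B's single pass computes the three filtered buckets
theorem pv_bfold (ss : List String) :
    ∀ (b1 b2 b3 : List String),
      ss.foldl (fun b sentence =>
        let low := PySem.Str.lower sentence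
        let stripped := PySem.Str.strip sentence
        let c1 := if PySem.Str.isIn "backup" low then b.1 ++ [stripped] else b.1
        let c2 := if PySem.Str.isIn "alternative" low then b.2.1 ++ [stripped] else b.2.1
        let c3 := if PySem.Str.isIn "secondary" low then b.2.2 ++ [stripped] else b.2.2
        (c1, c2, c3)) (b1, b2, b3)
      = (b1 ++ (ss.filter (fun s => PySem.Str.isIn "backup" (PySem.Str.lower s))).map PySem.Str.strip,
         b2 ++ (ss.filter (fun s => PySem.Str.isIn "alternative" (PySem.Str.lower s))).map PySem.Str.strip,
         b3 ++ (ss.filter (fun s => PySem.Str.isIn "secondary" (PySem.Str.lower s))).map PySem.Str.strip) := by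
  induction ss with
  | nil => intro b1 b2 b3; simp
  | cons s ss ih =>
    intro b1 b2 b3
    simp only [List.foldl_cons, List.filter_cons]
    rw [ih]
    split_ifs <;> simp_all

theorem pv_lower_backup : PySem.Str.lower "backup" = "backup" := by decide
theorem pv_lower_alternative : PySem.Str.lower "alternative" = "alternative" := by decide
theorem pv_lower_secondary : PySem.Str.lower "secondary" = "secondary" := by decide

-- if kw is absent from lower(content), no sentence matches it
theorem pv_filter_nil (content kw : String)
    (hc : PySem.Str.isIn kw (PySem.Str.lower content) = false) :
    ((PySem.Str.split? content ".").getD []).filter (fun s => PySem.Str.isIn kw (PySem.Str.lower s)) = [] := by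
  rw [List.filter_eq_nil_iff]
  intro s hs
  simp only [Bool.not_eq_true]
  by_contra h
  rw [Bool.not_eq_false] at h
  rw [pv_sentence_to_content content kw s hs h] at hc
  exact Bool.true_eq_false ▸ hc

theorem pv_guard (content kw : String) (acc : List String) :
    (if PySem.Str.isIn kw (PySem.Str.lower content) = true then
      ((PySem.Str.split? content ".").getD []).foldl (fun backups sentence =>
        if PySem.Str.isIn kw (PySem.Str.lower sentence) = true then backups ++ [PySem.Str.strip sentence] else backups) acc
     else acc)
    = acc ++ (((PySem.Str.split? content ".").getD []).filter (fun s => PySem.Str.isIn kw (PySem.Str.lower s))).map PySem.Str.strip := by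
  by_cases h : PySem.Str.isIn kw (PySem.Str.lower content) = true
  · rw [if_pos h]
    exact PySem.List.foldl_append_if _ _ _ _
  · rw [if_neg h, pv_filter_nil content kw (by simpa using h)]
    simp

-- ===== VERDICT (by name: the statement is the Claim_ definition above) =====
theorem extract_backup_contacts_py_spec : Claim_equal_extract_backup_contacts_py := by
  intro content _
  unfold Spec_extract_backup_contacts_py
  unfold extract_backup_contacts_py extract_backup_contacts_py_alt
  simp only [List.foldl_cons, List.foldl_nil]
  rw [pv_bfold]
  simp only [pv_lower_backup, pv_lower_alternative, pv_lower_secondary]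
  rw [pv_guard, pv_guard, pv_guard]
  simp [List.append_assoc]
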